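-- pv_equiv track=rewrite | github.com/DS-Thesis/PhD-Thesis-Chapter-4---Implementation | src/graph.py | threshold_sum
-- ===== SOURCE A (Python) =====
-- def threshold_sum(actions, values):
--
--     best_value = None
--     selected = []
--
--     for a in actions:
--         value = sum(values[a]["amp"]) - sum(values[a]["att"])
--         if best_value is None or value > best_value:
--             selected = [a]
--             best_value = value
--         elif value == best_value:
--             selected.append(a)
--
--     return selected
-- ===== SOURCE B (Python) =====
-- def threshold_sum(actions, values):
--     scores = [sum(values[a]["amp"]) - sum(values[a]["att"]) for a in actions]
--     if not scores:
--         return []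
--     best = max(scores)
--     return [a for a, v in zip(actions, scores) if v == best]
-- ===== Notes on version B (the rewrite author's own statement) =====
-- stated objective: simpler
-- what changed: Replaces the online running-best accumulator (Optional best + list rebuilt/extended in branches) with a two-pass materialize-then-select: build the score table, take max(), filter by equality.
import Mathlib
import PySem

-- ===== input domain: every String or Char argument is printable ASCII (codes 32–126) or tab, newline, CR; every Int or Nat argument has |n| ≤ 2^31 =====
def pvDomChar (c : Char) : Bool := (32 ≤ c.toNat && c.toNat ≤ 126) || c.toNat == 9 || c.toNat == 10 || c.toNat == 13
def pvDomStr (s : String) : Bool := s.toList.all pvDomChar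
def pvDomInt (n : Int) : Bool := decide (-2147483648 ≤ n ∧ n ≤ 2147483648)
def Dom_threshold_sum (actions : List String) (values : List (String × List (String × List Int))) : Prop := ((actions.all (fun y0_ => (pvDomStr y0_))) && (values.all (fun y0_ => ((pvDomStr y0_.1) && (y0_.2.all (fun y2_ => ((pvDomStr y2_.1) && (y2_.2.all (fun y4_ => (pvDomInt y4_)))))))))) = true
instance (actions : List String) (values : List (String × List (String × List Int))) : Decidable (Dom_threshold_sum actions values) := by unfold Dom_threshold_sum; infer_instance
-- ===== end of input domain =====

-- B replaces A's running-best accumulator loop with a two-pass decomposition: build the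
-- score table, take its max, then filter the actions whose score equals it (same cost).


-- ===== PORT A =====
-- Python: value = sum(values[a]["amp"]) - sum(values[a]["att"]); dict lookups are
-- first-match on the association list (keys of a Python dict are unique). On a missing
-- key Python raises KeyError; getD's default is never reached under Pre_threshold_sum.
def pyScore (values : List (String × List (String × List Int))) (a : String) : Int :=
  let m := (PySem.Dict.mk values).getD a []
  ((PySem.Dict.mk m).getD "amp" []).sum - ((PySem.Dict.mk m).getD "att" []).sum

def tsStep (values : List (String × List (String × List Int)))
    (st : Option Int × List String) (a : String) : Option Int × List String :=
  let value := pyScore values a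
  match st.1 with
  | none => (some value, [a])
  | some b =>
    if value > b then (some value, [a])
    else if value == b then (st.1, st.2 ++ [a])
    else st

def threshold_sum (actions : List String) (values : List (String × List (String × List Int))) : List String :=
  (actions.foldl (tsStep values) (none, [])).2

-- ===== PORT B =====
def threshold_sum_alt (actions : List String) (values : List (String × List (String × List Int))) : List String :=
  let scores := actions.map (pyScore values)
  match PySem.List.max? scores (fun x => x) with
  | none => []
  | some best => ((actions.zip scores).filter (fun p => p.2 == best)).map (·.1)

-- ===== PRECONDITION & SPEC =====
-- Pre_ excludes exactly the inputs where Python A raises KeyError: some action is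
-- missing from values, or its entry lacks an "amp" or "att" key.
def Pre_threshold_sum (actions : List String) (values : List (String × List (String × List Int))) : Prop :=
  (actions.all (fun a =>
    match values.find? (fun p => p.1 == a) with
    | some (_, m) => ((m.find? (fun q => q.1 == "amp")).isSome
                      && (m.find? (fun q => q.1 == "att")).isSome)
    | none => false)) = true
instance (actions : List String) (values : List (String × List (String × List Int))) : Decidable (Pre_threshold_sum actions values) := by unfold Pre_threshold_sum; infer_instance

def pvWitness_threshold_sum : List String × (List (String × List (String × List Int))) :=
  (["x", "y", "x"], [("x", [("amp", [3, 1]), ("att", [2])]), ("y", [("amp", [2]), ("att", [0])])])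

def Spec_threshold_sum (actions : List String) (values : List (String × List (String × List Int))) (out : List String) : Prop := out = threshold_sum_alt actions values
instance (actions : List String) (values : List (String × List (String × List Int))) (out : List String) : Decidable (Spec_threshold_sum actions values out) := by unfold Spec_threshold_sum; infer_instance

-- ===== CLAIM (what is proved, stated in full; the proofs are below) =====
def Claim_equal_threshold_sum : Prop := ∀ (actions : List String) (values : List (String × List (String × List Int))), Dom_threshold_sum actions values → Pre_threshold_sum actions values → Spec_threshold_sum actions values (threshold_sum actions values)

-- ===== LEMMAS AND PROOFS =====

-- A's loop, started with a known best b and selection sel, computes the running max of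
-- b with the scores and keeps sel only when no score beats b, followed by all actions
-- whose score equals that max.
theorem tsLoop_some (values : List (String × List (String × List Int))) :
    ∀ (l : List String) (b : Int) (sel : List String),
      List.foldl (tsStep values) (some b, sel) l =
        (some (List.foldl max b (l.map (pyScore values))),
         (if b = List.foldl max b (l.map (pyScore values)) then sel else [])
           ++ l.filter (fun a => pyScore values a == List.foldl max b (l.map (pyScore values)))) := by
  intro l
  induction l with
  | nil => intro b sel; simp
  | cons a t ih =>
    intro b sel
    have hle := PySem.List.le_foldl_max (t.map (pyScore values))
    by_cases hgt : pyScore values a > b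
    · have hstep : tsStep values (some b, sel) a = (some (pyScore values a), [a]) := by
        simp [tsStep, hgt]
      have hb : max b (pyScore values a) = pyScore values a := by omega
      have hbne : b ≠ List.foldl max (pyScore values a) (t.map (pyScore values)) := by
        have := (hle (pyScore values a)).1; omega
      simp only [List.foldl_cons, hstep, ih, List.map_cons, hb, List.filter_cons]
      by_cases heq : pyScore values a = List.foldl max (pyScore values a) (t.map (pyScore values))
      · have hc : (pyScore values a == List.foldl max (pyScore values a) (t.map (pyScore values))) = true :=
          beq_iff_eq.mpr heq
        simp only [if_pos heq, if_neg hbne, hc, if_true]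
        simp
      · have hc : (pyScore values a == List.foldl max (pyScore values a) (t.map (pyScore values))) = false :=
          beq_eq_false_iff_ne.mpr heq
        simp only [if_neg heq, if_neg hbne, hc]
        simp
    · by_cases heq : pyScore values a = b
      · have hstep : tsStep values (some b, sel) a = (some b, sel ++ [a]) := by
          simp [tsStep, heq]
        have hb : max b (pyScore values a) = b := by omega
        simp only [List.foldl_cons, hstep, ih, List.map_cons, hb, List.filter_cons]
        by_cases hbm : b = List.foldl max b (t.map (pyScore values))
        · have hfa : (pyScore values a == List.foldl max b (t.map (pyScore values))) = true := by
            rw [heq]; exact beq_iff_eq.mpr hbm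
          simp only [if_pos hbm, hfa, if_true]
          simp
        · have hfa : (pyScore values a == List.foldl max b (t.map (pyScore values))) = false := by
            rw [heq]; exact beq_eq_false_iff_ne.mpr hbm
          simp only [if_neg hbm, hfa]
          simp
      · have hstep : tsStep values (some b, sel) a = (some b, sel) := by
          simp [tsStep, hgt, heq]
        have hb : max b (pyScore values a) = b := by omega
        have hane : ¬ (pyScore values a = List.foldl max b (t.map (pyScore values))) := by
          have := (hle b).1; omega
        simp only [List.foldl_cons, hstep, ih, List.map_cons, hb, List.filter_cons]
        simp [hane]

theorem zip_map_filter (f : String → Int) (best : Int) :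
    ∀ (l : List String),
      (((l.zip (l.map f)).filter (fun p => p.2 == best)).map (·.1))
        = l.filter (fun a => f a == best) := by
  intro l
  induction l with
  | nil => rfl
  | cons a t ih =>
    simp only [List.map_cons, List.zip_cons_cons, List.filter_cons]
    by_cases h : f a = best <;> simp [h, ih]

-- ===== VERDICT (by name: the statement is the Claim_ definition above) =====
theorem threshold_sum_spec : Claim_equal_threshold_sum := by
  intro actions values _ _
  unfold Spec_threshold_sum threshold_sum threshold_sum_alt
  cases actions with
  | nil => rfl
  | cons a t =>
    have hstep : tsStep values (none, []) a = (some (pyScore values a), [a]) := by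
      simp [tsStep]
    rw [List.foldl_cons, hstep, tsLoop_some, List.map_cons]
    simp only [PySem.List.max?_id_cons]
    rw [← List.map_cons, zip_map_filter]
    simp only [List.filter_cons]
    by_cases h : pyScore values a = List.foldl max (pyScore values a) (t.map (pyScore values))
    · have hc : (pyScore values a == List.foldl max (pyScore values a) (t.map (pyScore values))) = true :=
        beq_iff_eq.mpr h
      simp only [if_pos h, hc, if_true]
      simp
    · have hc : (pyScore values a == List.foldl max (pyScore values a) (t.map (pyScore values))) = false :=
        beq_eq_false_iff_ne.mpr h
      simp only [if_neg h, hc]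
      simp
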